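-- pv_equiv track=rewrite | github.com/kohiniku/markdown_pdf_converter | backend/app/renderer.py | _expand_margin_shorthand
-- ===== SOURCE A (Python) =====
-- def _expand_margin_shorthand(margin: str) -> tuple[str, str, str, str]:
--     parts = [p for p in margin.split() if p]
--     if not parts:
--         return ("0", "0", "0", "0")
--     if len(parts) == 1:
--         return (parts[0], parts[0], parts[0], parts[0])
--     if len(parts) == 2:
--         return (parts[0], parts[1], parts[0], parts[1])
--     if len(parts) == 3:
--         return (parts[0], parts[1], parts[2], parts[1])
--     return (parts[0], parts[1], parts[2], parts[3])
-- ===== SOURCE B (Python) =====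
-- def _expand_margin_shorthand(margin: str) -> tuple[str, str, str, str]:
--     parts = margin.split()
--     if not parts:
--         return ("0", "0", "0", "0")
--     # CSS mirror rule as a padding loop: each missing side copies the value
--     # two positions back (bottom<-top, left<-right); with one value, copy it.
--     while len(parts) < 4:
--         parts.append(parts[-2] if len(parts) >= 2 else parts[0])
--     return (parts[0], parts[1], parts[2], parts[3])
-- ===== Notes on version B (the rewrite author's own statement) =====
-- stated objective: alternative
-- what changed: Replaces the four-case length-dispatch table with the CSS mirror-padding loop: the token list is extended by copying the value two positions back (parts[-2]) until it has four entries, then the four sides are read off the padded list.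
import Mathlib
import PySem

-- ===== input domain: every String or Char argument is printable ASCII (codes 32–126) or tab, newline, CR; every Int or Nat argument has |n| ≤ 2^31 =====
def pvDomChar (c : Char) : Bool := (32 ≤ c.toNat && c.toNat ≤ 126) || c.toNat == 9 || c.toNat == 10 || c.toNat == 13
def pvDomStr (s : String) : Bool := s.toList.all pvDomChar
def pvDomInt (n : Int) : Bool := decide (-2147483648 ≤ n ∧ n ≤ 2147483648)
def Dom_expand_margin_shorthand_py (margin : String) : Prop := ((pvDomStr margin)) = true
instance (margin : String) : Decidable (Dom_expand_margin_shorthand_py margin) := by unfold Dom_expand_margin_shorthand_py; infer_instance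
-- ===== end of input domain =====

-- B replaces A's length-dispatch case table with the CSS mirror-padding loop (append parts[-2] until 4 entries); objective: alternative decomposition, same cost.


-- ===== PORT A =====
def expand_margin_shorthand_py (margin : String) : String × String × String × String :=
  let parts := (PySem.Str.split₀ margin).filter (fun p => p ≠ "")
  if parts = [] then ("0", "0", "0", "0")
  else if parts.length = 1 then (parts.getD 0 "", parts.getD 0 "", parts.getD 0 "", parts.getD 0 "")
  else if parts.length = 2 then (parts.getD 0 "", parts.getD 1 "", parts.getD 0 "", parts.getD 1 "")
  else if parts.length = 3 then (parts.getD 0 "", parts.getD 1 "", parts.getD 2 "", parts.getD 1 "")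
  else (parts.getD 0 "", parts.getD 1 "", parts.getD 2 "", parts.getD 3 "")

-- ===== PORT B =====
-- the while loop of Source B: append parts[-2] (or parts[0] when a single entry) while len < 4;
-- parts[-2] on a list of length ≥ 2 is exactly ps.getD (ps.length - 2) "".
def pvPadMirror (ps : List String) : List String :=
  if ps.length < 4 then
    pvPadMirror (ps ++ [if 2 ≤ ps.length then ps.getD (ps.length - 2) "" else ps.getD 0 ""])
  else ps
termination_by 4 - ps.length
decreasing_by simp; omega

def expand_margin_shorthand_py_alt (margin : String) : String × String × String × String :=
  let parts := PySem.Str.split₀ margin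
  if parts = [] then ("0", "0", "0", "0")
  else
    let padded := pvPadMirror parts
    (padded.getD 0 "", padded.getD 1 "", padded.getD 2 "", padded.getD 3 "")

-- ===== PRECONDITION & SPEC =====
def Spec_expand_margin_shorthand_py (margin : String) (out : String × String × String × String) : Prop := out = expand_margin_shorthand_py_alt margin
instance (margin : String) (out : String × String × String × String) : Decidable (Spec_expand_margin_shorthand_py margin out) := by unfold Spec_expand_margin_shorthand_py; infer_instance

-- ===== CLAIM (what is proved, stated in full; the proofs are below) =====
def Claim_equal_expand_margin_shorthand_py : Prop := ∀ (margin : String), Dom_expand_margin_shorthand_py margin → Spec_expand_margin_shorthand_py margin (expand_margin_shorthand_py margin)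

-- ===== LEMMAS AND PROOFS =====

-- str.split() never yields empty tokens (invariant of split₀.go: only nonempty words are pushed).
theorem pv_go_ne_nil : ∀ (s cur : List Char) (acc : List (List Char)),
    (∀ l ∈ acc, l ≠ []) → ∀ l ∈ PySem.Chars.split₀.go s cur acc, l ≠ [] := by
  intro s
  induction s with
  | nil =>
    intro cur acc hacc l hl
    simp only [PySem.Chars.split₀.go] at hl
    split at hl
    · exact hacc l (by simpa using hl)
    · rw [List.mem_reverse, List.mem_cons] at hl
      rcases hl with h | h
      · subst h; simpa [List.isEmpty_iff] using ‹¬ cur.isEmpty = true›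
      · exact hacc l h
  | cons c rest ih =>
    intro cur acc hacc l hl
    simp only [PySem.Chars.split₀.go] at hl
    split at hl
    · split at hl
      · exact ih [] acc hacc l hl
      · refine ih [] (cur.reverse :: acc) ?_ l hl
        intro m hm
        rw [List.mem_cons] at hm
        rcases hm with hm | hm
        · subst hm; simpa [List.isEmpty_iff] using ‹¬ cur.isEmpty = true›
        · exact hacc m hm
    · exact ih (c :: cur) acc hacc l hl

-- hence A's filter is the identity on split₀'s output
theorem pv_split_no_empty (s : String) :
    (PySem.Str.split₀ s).filter (fun p => p ≠ "") = PySem.Str.split₀ s := by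
  rw [List.filter_eq_self]
  intro p hp
  simp only [PySem.Str.split₀, List.mem_map] at hp
  obtain ⟨l, hl, rfl⟩ := hp
  have hne : l ≠ [] := pv_go_ne_nil _ [] [] (by simp) l hl
  simp only [decide_eq_true_eq]
  intro h
  apply hne
  have := congrArg String.toList h
  simpa using this

theorem pvPadMirror_one (a : String) : pvPadMirror [a] = [a, a, a, a] := by
  rw [pvPadMirror]; norm_num
  rw [pvPadMirror]; norm_num
  rw [pvPadMirror]; norm_num
  rw [pvPadMirror]; norm_num

theorem pvPadMirror_two (a b : String) : pvPadMirror [a, b] = [a, b, a, b] := by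
  rw [pvPadMirror]; norm_num
  rw [pvPadMirror]; norm_num
  rw [pvPadMirror]; norm_num

theorem pvPadMirror_three (a b c : String) : pvPadMirror [a, b, c] = [a, b, c, b] := by
  rw [pvPadMirror]; norm_num
  rw [pvPadMirror]; norm_num

theorem pvPadMirror_ge_four (a b c d : String) (r : List String) :
    pvPadMirror (a :: b :: c :: d :: r) = a :: b :: c :: d :: r := by
  rw [pvPadMirror]; simp

-- ===== VERDICT (by name: the statement is the Claim_ definition above) =====
theorem expand_margin_shorthand_py_spec : Claim_equal_expand_margin_shorthand_py := by
  intro margin _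
  unfold Spec_expand_margin_shorthand_py expand_margin_shorthand_py expand_margin_shorthand_py_alt
  rw [pv_split_no_empty]
  rcases PySem.Str.split₀ margin with _ | ⟨a, _ | ⟨b, _ | ⟨c, _ | ⟨d, rest⟩⟩⟩⟩ <;>
    simp [pvPadMirror_one, pvPadMirror_two, pvPadMirror_three, pvPadMirror_ge_four]
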